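-- pv_equiv track=rewrite | github.com/deusexrenovatio-arch/trading-advisor-3000 | src/trading_advisor_3000/dagster_defs/moex_historical_assets.py | _resolve_expected_materialization
-- ===== SOURCE A (Python) =====
-- from collections.abc import Sequence
--
-- MOEX_HISTORICAL_ASSET_KEYS = (
--     "moex_raw_ingest",
--     "moex_canonical_refresh",
-- )
--
-- MOEX_HISTORICAL_DEPENDENCIES: dict[str, tuple[str, ...]] = {
--     "moex_raw_ingest": tuple(),
--     "moex_canonical_refresh": ("moex_raw_ingest",),
-- }
--
-- def _resolve_expected_materialization(selection: Sequence[str]) -> list[str]: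
--     resolved: set[str] = set()
--
--     def _visit(asset_name: str) -> None:
--         if asset_name in resolved:
--             return
--         for dependency in MOEX_HISTORICAL_DEPENDENCIES.get(asset_name, tuple()):
--             _visit(dependency)
--         resolved.add(asset_name)
--
--     for asset_name in selection:
--         _visit(asset_name)
--     return [asset_name for asset_name in MOEX_HISTORICAL_ASSET_KEYS if asset_name in resolved]
-- ===== SOURCE B (Python) =====
-- MOEX_HISTORICAL_ASSET_KEYS = (
--     "moex_raw_ingest",
--     "moex_canonical_refresh",
-- )
--
-- MOEX_HISTORICAL_DEPENDENCIES: dict = {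
--     "moex_raw_ingest": tuple(),
--     "moex_canonical_refresh": ("moex_raw_ingest",),
-- }
--
-- def _resolve_expected_materialization(selection):
--     # The dependency graph is a fixed two-node chain, so the closure is a
--     # closed-form membership test: raw_ingest is needed if anything known was
--     # selected; canonical_refresh only if selected itself.
--     out = []
--     if "moex_raw_ingest" in selection or "moex_canonical_refresh" in selection:
--         out.append("moex_raw_ingest")
--     if "moex_canonical_refresh" in selection:
--         out.append("moex_canonical_refresh")
--     return out
-- ===== Notes on version B (the rewrite author's own statement) =====
-- stated objective: simpler
-- what changed: Replaces the recursive _visit graph traversal with a resolved-set plus final filter by a closed-form membership test over the fixed two-node dependency chain.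
import Mathlib
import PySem

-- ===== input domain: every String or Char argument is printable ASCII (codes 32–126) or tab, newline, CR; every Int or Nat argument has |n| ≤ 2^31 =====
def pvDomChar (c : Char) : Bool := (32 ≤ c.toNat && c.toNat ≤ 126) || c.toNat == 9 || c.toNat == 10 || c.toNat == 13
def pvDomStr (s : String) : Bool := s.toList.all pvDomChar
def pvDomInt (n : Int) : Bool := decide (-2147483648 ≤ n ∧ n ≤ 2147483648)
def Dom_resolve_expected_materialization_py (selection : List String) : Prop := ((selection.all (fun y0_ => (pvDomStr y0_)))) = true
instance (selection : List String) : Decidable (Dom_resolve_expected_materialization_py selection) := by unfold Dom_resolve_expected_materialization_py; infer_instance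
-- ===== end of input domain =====

-- B replaces A's recursive graph traversal by a closed-form membership test over the fixed two-node dependency chain (simpler).

-- ===== PORT A =====
-- MOEX_HISTORICAL_DEPENDENCIES.get(name, tuple())
def pvDeps (name : String) : List String :=
  PySem.Dict.getD
    (PySem.Dict.mk
      [("moex_raw_ingest", ([] : List String)),
       ("moex_canonical_refresh", ["moex_raw_ingest"])]) name []

-- _visit; the fuel argument only makes the recursion structural: the fixed
-- dependency graph has depth ≤ 2, so fuel 2 is never exhausted.
def pvVisit : Nat → String → PySem.Set String → PySem.Set String
  | 0, _, resolved => resolved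
  | f + 1, name, resolved =>
    if PySem.Set.contains resolved name then resolved
    else PySem.Set.add ((pvDeps name).foldl (fun acc d => pvVisit f d acc) resolved) name

def resolve_expected_materialization_py (selection : List String) : List String :=
  let resolved := selection.foldl (fun r n => pvVisit 2 n r) PySem.Set.empty
  (["moex_raw_ingest", "moex_canonical_refresh"]).filter
    (fun k => PySem.Set.contains resolved k)

-- ===== PORT B =====
def resolve_expected_materialization_py_alt (selection : List String) : List String :=
  (if selection.contains "moex_raw_ingest" || selection.contains "moex_canonical_refresh"
    then ["moex_raw_ingest"] else []) ++
  (if selection.contains "moex_canonical_refresh" then ["moex_canonical_refresh"] else [])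

-- ===== PRECONDITION & SPEC =====
def Spec_resolve_expected_materialization_py (selection : List String) (out : List String) : Prop := out = resolve_expected_materialization_py_alt selection
instance (selection : List String) (out : List String) : Decidable (Spec_resolve_expected_materialization_py selection out) := by unfold Spec_resolve_expected_materialization_py; infer_instance

-- ===== CLAIM (what is proved, stated in full; the proofs are below) =====
def Claim_equal_resolve_expected_materialization_py : Prop := ∀ (selection : List String), Dom_resolve_expected_materialization_py selection → Spec_resolve_expected_materialization_py selection (resolve_expected_materialization_py selection)

-- ===== LEMMAS AND PROOFS =====

theorem pvDeps_raw : pvDeps "moex_raw_ingest" = [] := rfl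

theorem pvDeps_canon : pvDeps "moex_canonical_refresh" = ["moex_raw_ingest"] := rfl

theorem pvDeps_other (name : String) (h1 : name ≠ "moex_raw_ingest")
    (h2 : name ≠ "moex_canonical_refresh") : pvDeps name = [] := by
  have e1 : (("moex_raw_ingest" : String) == name) = false :=
    beq_eq_false_iff_ne.mpr (Ne.symm h1)
  have e2 : (("moex_canonical_refresh" : String) == name) = false :=
    beq_eq_false_iff_ne.mpr (Ne.symm h2)
  simp [pvDeps, PySem.Dict.getD, PySem.Dict.get?, List.find?, e1, e2]

-- One-step evaluation of the visit of a node with no dependencies.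
theorem pvVisit_leaf (f : Nat) (name : String) (r : PySem.Set String)
    (hdeps : pvDeps name = []) :
    pvVisit (f + 1) name r = if r.contains name then r else PySem.Set.add r name := by
  simp only [pvVisit, hdeps, List.foldl_nil, PySem.Set.contains]
  rfl


theorem pvVisit_canon (r : PySem.Set String) :
    pvVisit 2 "moex_canonical_refresh" r =
      if r.contains "moex_canonical_refresh" then r
      else
        PySem.Set.add
          (if r.contains "moex_raw_ingest" then r else PySem.Set.add r "moex_raw_ingest")
          "moex_canonical_refresh" := by
  simp only [pvVisit, pvDeps_canon, pvDeps_raw, List.foldl_cons, List.foldl_nil,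
    PySem.Set.contains]
  rfl

-- One visit step: membership of the two asset keys, assuming the invariant
-- "canonical present → raw present" on the resolved set.
theorem pvVisit_mem (name : String) (r : PySem.Set String)
    (hinv : "moex_canonical_refresh" ∈ r → "moex_raw_ingest" ∈ r) :
    (("moex_raw_ingest" ∈ pvVisit 2 name r) ↔
      ("moex_raw_ingest" ∈ r ∨ name = "moex_raw_ingest" ∨ name = "moex_canonical_refresh")) ∧
    (("moex_canonical_refresh" ∈ pvVisit 2 name r) ↔
      ("moex_canonical_refresh" ∈ r ∨ name = "moex_canonical_refresh")) := by
  by_cases h2 : name = "moex_canonical_refresh"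
  · subst h2
    rw [pvVisit_canon]
    by_cases hc : "moex_canonical_refresh" ∈ r
    · simp [hc, hinv hc]
    · by_cases hr : "moex_raw_ingest" ∈ r <;>
        simp [PySem.Set.add, PySem.Set.contains, hc, hr]
  · by_cases h1 : name = "moex_raw_ingest"
    · subst h1
      rw [pvVisit_leaf 1 _ r pvDeps_raw]
      split_ifs with h <;> simp_all [PySem.Set.add]
    · rw [pvVisit_leaf 1 _ r (pvDeps_other name h1 h2)]
      split_ifs with h <;> simp_all [PySem.Set.add, eq_comm]

-- Folding visits over the whole selection, from any set satisfying the invariant.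
theorem pvFold_mem (sel : List String) (r : PySem.Set String)
    (hinv : "moex_canonical_refresh" ∈ r → "moex_raw_ingest" ∈ r) :
    (("moex_raw_ingest" ∈ sel.foldl (fun r n => pvVisit 2 n r) r) ↔
      ("moex_raw_ingest" ∈ r ∨ "moex_raw_ingest" ∈ sel ∨ "moex_canonical_refresh" ∈ sel)) ∧
    (("moex_canonical_refresh" ∈ sel.foldl (fun r n => pvVisit 2 n r) r) ↔
      ("moex_canonical_refresh" ∈ r ∨ "moex_canonical_refresh" ∈ sel)) := by
  induction sel generalizing r with
  | nil => simp
  | cons x xs ih =>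
    obtain ⟨hraw, hcan⟩ := pvVisit_mem x r hinv
    have hinv' : "moex_canonical_refresh" ∈ pvVisit 2 x r →
        "moex_raw_ingest" ∈ pvVisit 2 x r := by
      intro h; rcases hcan.1 h with h' | h'
      · exact hraw.2 (Or.inl (hinv h'))
      · exact hraw.2 (Or.inr (Or.inr h'))
    obtain ⟨ihr, ihc⟩ := ih (pvVisit 2 x r) hinv'
    have e : List.foldl (fun r n => pvVisit 2 n r) r (x :: xs)
        = List.foldl (fun r n => pvVisit 2 n r) (pvVisit 2 x r) xs := rfl
    rw [e, ihr, ihc, hraw, hcan]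
    constructor
    · constructor
      · rintro ((h | h | h) | h | h)
        · exact Or.inl h
        · exact Or.inr (Or.inl (List.mem_cons.mpr (Or.inl h.symm)))
        · exact Or.inr (Or.inr (List.mem_cons.mpr (Or.inl h.symm)))
        · exact Or.inr (Or.inl (List.mem_cons.mpr (Or.inr h)))
        · exact Or.inr (Or.inr (List.mem_cons.mpr (Or.inr h)))
      · rintro (h | h | h)
        · exact Or.inl (Or.inl h)
        · rcases List.mem_cons.mp h with h' | h'
          · exact Or.inl (Or.inr (Or.inl h'.symm))
          · exact Or.inr (Or.inl h')
        · rcases List.mem_cons.mp h with h' | h'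
          · exact Or.inl (Or.inr (Or.inr h'.symm))
          · exact Or.inr (Or.inr h')
    · constructor
      · rintro ((h | h) | h)
        · exact Or.inl h
        · exact Or.inr (List.mem_cons.mpr (Or.inl h.symm))
        · exact Or.inr (List.mem_cons.mpr (Or.inr h))
      · rintro (h | h)
        · exact Or.inl (Or.inl h)
        · rcases List.mem_cons.mp h with h' | h'
          · exact Or.inl (Or.inr h'.symm)
          · exact Or.inr h'

-- ===== VERDICT (by name: the statement is the Claim_ definition above) =====
theorem resolve_expected_materialization_py_spec : Claim_equal_resolve_expected_materialization_py := by
  intro selection _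
  unfold Spec_resolve_expected_materialization_py
  unfold resolve_expected_materialization_py resolve_expected_materialization_py_alt
  obtain ⟨hraw, hcan⟩ := pvFold_mem selection PySem.Set.empty (by simp [PySem.Set.empty])
  simp only [PySem.Set.empty, List.not_mem_nil, false_or] at hraw hcan
  simp only [List.filter_cons, List.filter_nil, PySem.Set.contains]
  by_cases h1 : "moex_raw_ingest" ∈ selection <;>
  by_cases h2 : "moex_canonical_refresh" ∈ selection <;>
    simp [hraw, hcan, h1, h2]
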